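-- pv_equiv track=rewrite | github.com/SYRS-AI/agent-bridge-public | bridge-setup.py | extract_token_from_text
-- ===== SOURCE A (Python) =====
-- def extract_token_from_text(text: str, kind: str) -> str:
--     stripped = text.strip()
--     if not stripped:
--         return ""
--
--     if kind == "telegram":
--         keys = ("TELEGRAM_BOT_TOKEN", "BOT_TOKEN", "TOKEN")
--     elif kind == "discord":
--         keys = ("DISCORD_BOT_TOKEN", "BOT_TOKEN", "TOKEN")
--     else:
--         keys = ("TOKEN",)
--
--     lines = [line.strip() for line in text.splitlines() if line.strip() and not line.strip().startswith("#")]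
--     for key in keys:
--         prefix = f"{key}="
--         for line in lines:
--             if line.startswith(prefix):
--                 return line.split("=", 1)[1].strip().strip("'").strip('"')
--
--     if len(lines) == 1 and "=" not in lines[0]:
--         return lines[0]
--
--     return ""
-- ===== SOURCE B (Python) =====
-- def extract_token_from_text(text: str, kind: str) -> str:
--     if not text.strip():
--         return ""
--
--     lines = []
--     for raw in text.splitlines():
--         ln = raw.strip()
--         if ln and not ln.startswith("#"):
--             lines.append(ln)
--
--     entries = {}
--     for ln in lines:
--         if "=" in ln:
--             k, v = ln.split("=", 1)
--             entries.setdefault(k, v)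
--
--     keys = {
--         "telegram": ("TELEGRAM_BOT_TOKEN", "BOT_TOKEN", "TOKEN"),
--         "discord": ("DISCORD_BOT_TOKEN", "BOT_TOKEN", "TOKEN"),
--     }.get(kind, ("TOKEN",))
--
--     for key in keys:
--         if key in entries:
--             return entries[key].strip().strip("'").strip('"')
--
--     if len(lines) == 1 and "=" not in lines[0]:
--         return lines[0]
--     return ""
-- ===== Notes on version B (the rewrite author's own statement) =====
-- stated objective: idiomatic
-- what changed: Replaces the nested key-by-line startswith scan with a single pass that parses each cleaned line once into a first-wins key-to-value dict (setdefault on the first '=' split) and then looks the priority keys up in the dict.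
import Mathlib
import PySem

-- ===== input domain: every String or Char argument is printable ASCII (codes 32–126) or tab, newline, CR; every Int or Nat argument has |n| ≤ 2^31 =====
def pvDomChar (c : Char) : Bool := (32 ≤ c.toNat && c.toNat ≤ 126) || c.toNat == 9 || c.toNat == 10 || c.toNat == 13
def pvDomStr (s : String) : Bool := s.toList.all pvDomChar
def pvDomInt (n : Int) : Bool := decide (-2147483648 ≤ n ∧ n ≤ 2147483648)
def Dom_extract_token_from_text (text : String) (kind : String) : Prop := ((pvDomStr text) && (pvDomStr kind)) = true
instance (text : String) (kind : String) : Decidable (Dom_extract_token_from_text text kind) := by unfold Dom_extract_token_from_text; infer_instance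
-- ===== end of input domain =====

-- B replaces A's nested key-by-line startswith scan with one parsing pass into a first-wins dict, then key lookups (idiomatic; same cost class).

-- ===== PORT A =====
-- line.split("=", 1)[1].strip().strip("'").strip('"'); the index [1] is only reached under the startswith guard, so the none branch is unreachable
def pvValA (line : String) : String :=
  match PySem.List.pyGet? ((PySem.Str.splitMax? line "=" 1).getD [line]) 1 with
  | some v => PySem.Str.stripChars (PySem.Str.stripChars (PySem.Str.strip v) "'") "\""
  | none => ""

-- 'for key in keys: for line in lines: if line.startswith(key + "="): return …'
def pvScanA (lines : List String) : List String → Option String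
  | [] => none
  | key :: ks =>
    match lines.find? (fun line => PySem.Str.startswith line (key ++ "=")) with
    | some line => some (pvValA line)
    | none => pvScanA lines ks

def extract_token_from_text (text : String) (kind : String) : String :=
  if PySem.Str.strip text = "" then ""
  else
    let keys := if kind = "telegram" then ["TELEGRAM_BOT_TOKEN", "BOT_TOKEN", "TOKEN"]
      else if kind = "discord" then ["DISCORD_BOT_TOKEN", "BOT_TOKEN", "TOKEN"]
      else ["TOKEN"]
    let lines := (PySem.Str.splitlines text).filterMap (fun raw =>
      let l := PySem.Str.strip raw
      if l ≠ "" && !(PySem.Str.startswith l "#") then some l else none)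
    match pvScanA lines keys with
    | some v => v
    | none =>
      match lines with
      | [l] => if PySem.Str.isIn "=" l then "" else l
      | _ => ""

-- ===== PORT B =====
-- ln.split("=", 1) under the '"=" in ln' guard, as a pair (the fallback branch is unreachable)
def pvSplitEq (ln : String) : String × String :=
  let parts := (PySem.Str.splitMax? ln "=" 1).getD []
  (parts.headD "", parts.tail.headD "")

-- body of B's dict-building loop: entries.setdefault(k, v) for lines containing '='
def pvStepB (d : PySem.Dict String String) (ln : String) : PySem.Dict String String :=
  if PySem.Str.isIn "=" ln then
    let p := pvSplitEq ln
    d.setdefault p.1 p.2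
  else d

-- 'for key in keys: if key in entries: return entries[key].strip().strip("'").strip('"')'
def pvLookupB (d : PySem.Dict String String) : List String → Option String
  | [] => none
  | key :: ks =>
    match d.get? key with
    | some v => some (PySem.Str.stripChars (PySem.Str.stripChars (PySem.Str.strip v) "'") "\"")
    | none => pvLookupB d ks

def extract_token_from_text_alt (text : String) (kind : String) : String :=
  if PySem.Str.strip text = "" then ""
  else
    let lines := (PySem.Str.splitlines text).filterMap (fun raw =>
      let l := PySem.Str.strip raw
      if l ≠ "" && !(PySem.Str.startswith l "#") then some l else none)
    let entries := lines.foldl pvStepB PySem.Dict.empty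
    let keys := ((PySem.Dict.empty.insert "telegram" ["TELEGRAM_BOT_TOKEN", "BOT_TOKEN", "TOKEN"]).insert "discord" ["DISCORD_BOT_TOKEN", "BOT_TOKEN", "TOKEN"]).getD kind ["TOKEN"]
    (pvLookupB entries keys).getD
      (if lines.length = 1 then
        (if PySem.Str.isIn "=" ((PySem.List.pyGet? lines 0).getD "") then ""
         else (PySem.List.pyGet? lines 0).getD "")
       else "")

-- ===== PRECONDITION & SPEC =====
def Spec_extract_token_from_text (text : String) (kind : String) (out : String) : Prop := out = extract_token_from_text_alt text kind
instance (text : String) (kind : String) (out : String) : Decidable (Spec_extract_token_from_text text kind out) := by unfold Spec_extract_token_from_text; infer_instance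

-- ===== CLAIM (what is proved, stated in full; the proofs are below) =====
def Claim_equal_extract_token_from_text : Prop := ∀ (text : String) (kind : String), Dom_extract_token_from_text text kind → Spec_extract_token_from_text text kind (extract_token_from_text text kind)

-- ===== LEMMAS AND PROOFS =====

lemma pv_go_zero (fuel : Nat) (l cur : List Char) (acc : List (List Char)) :
    PySem.Chars.splitOnMax.go ['='] fuel 0 l cur acc = ((cur.reverse ++ l) :: acc).reverse := by
  cases fuel with
  | zero => simp [PySem.Chars.splitOnMax.go]
  | succ f => cases l <;> simp [PySem.Chars.splitOnMax.go]

set_option maxRecDepth 4096 in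
lemma pv_go_one (l : List Char) : ∀ (fuel : Nat) (cur : List Char) (acc : List (List Char)),
    l.length ≤ fuel →
    PySem.Chars.splitOnMax.go ['='] (fuel + 1) 1 l cur acc =
      if '=' ∈ l then
        acc.reverse ++ [cur.reverse ++ l.takeWhile (· != '='), (l.dropWhile (· != '=')).tail]
      else acc.reverse ++ [cur.reverse ++ l] := by
  induction l with
  | nil => intro fuel cur acc _; simp [PySem.Chars.splitOnMax.go]
  | cons c rest ih =>
    intro fuel cur acc hf
    cases fuel with
    | zero => simp at hf
    | succ f =>
      by_cases hc : c = '='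
      · subst hc
        simp [PySem.Chars.splitOnMax.go, pv_go_zero]
      · have hne : ('=' == c) = false := by
          simp only [beq_eq_false_iff_ne]; exact fun h => hc h.symm
        have hstep : PySem.Chars.splitOnMax.go ['='] (f + 1 + 1) 1 (c :: rest) cur acc =
            PySem.Chars.splitOnMax.go ['='] (f + 1) 1 rest (c :: cur) acc := by
          simp [PySem.Chars.splitOnMax.go, List.isPrefixOf, hne]
        rw [hstep, ih f (c :: cur) acc (by simpa using hf)]
        have hcne : (c != '=') = true := by simp [hc]
        by_cases hm : '=' ∈ rest <;>
          simp [hm, hcne, Ne.symm hc]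

-- s.split("=", 1) characterised by takeWhile/dropWhile at the first '='
lemma pv_splitOnMax_char (l : List Char) :
    PySem.Chars.splitOnMax l ['='] 1 =
      if '=' ∈ l then [l.takeWhile (· != '='), (l.dropWhile (· != '=')).tail] else [l] := by
  have h := pv_go_one l (l.length) [] [] (le_refl _)
  unfold PySem.Chars.splitOnMax
  simp only [show ¬((1:Int) < 0) by norm_num, if_false]
  simpa using h

lemma pv_splitMax_str (s : String) :
    PySem.Str.splitMax? s "=" 1 =
      some (if '=' ∈ s.toList then
        [String.ofList (s.toList.takeWhile (· != '=')), String.ofList ((s.toList.dropWhile (· != '=')).tail)]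
      else [s]) := by
  unfold PySem.Str.splitMax? PySem.Chars.splitMax?
  rw [show ("=" : String).toList = ['='] from rfl]
  simp [pv_splitOnMax_char]
  split <;> simp

lemma pv_isIn_iff (s : String) : PySem.Str.isIn "=" s = true ↔ '=' ∈ s.toList := by
  rw [PySem.Str.isIn_iff_infix]
  exact List.singleton_infix_iff '=' s.toList

lemma pv_dropWhile_head_false {p : Char → Bool} : ∀ {l : List Char} {c : Char} {t : List Char},
    l.dropWhile p = c :: t → p c = false := by
  intro l
  induction l with
  | nil => intro c t h; simp at h
  | cons a as ih =>
    intro c t h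
    by_cases hp : p a
    · rw [List.dropWhile_cons_of_pos hp] at h; exact ih h
    · rw [List.dropWhile_cons_of_neg hp] at h
      cases h
      simpa using hp

-- line.startswith(key + "=") ↔ '=' occurs in line and the part before the first '=' is exactly key
lemma pv_startswith_iff (l key : String) (hk : '=' ∉ key.toList) :
    PySem.Str.startswith l (key ++ "=") = true ↔
      ('=' ∈ l.toList ∧ l.toList.takeWhile (· != '=') = key.toList) := by
  have hkey : ∀ x ∈ key.toList, (x != '=') = true := by
    intro x hx; simp only [bne_iff_ne, ne_eq]; exact fun h => hk (h ▸ hx)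
  rw [show PySem.Str.startswith l (key ++ "=") = PySem.Chars.startswith l.toList (key.toList ++ ['=']) by
        simp [PySem.Str.startswith_eq]]
  unfold PySem.Chars.startswith
  rw [List.isPrefixOf_iff_prefix]
  constructor
  · rintro ⟨t, ht⟩
    have hl : l.toList = key.toList ++ '=' :: t := by simpa using ht.symm
    refine ⟨by simp [hl], ?_⟩
    rw [hl, List.takeWhile_append_of_pos hkey]
    simp
  · rintro ⟨hmem, htake⟩
    have hsplit := List.takeWhile_append_dropWhile (p := (· != '=')) (l := l.toList)
    cases hdwc : l.toList.dropWhile (· != '=') with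
    | nil =>
      exfalso
      rw [hdwc, List.append_nil] at hsplit
      apply hk
      rw [← htake, hsplit]
      exact hmem
    | cons c t =>
      have hc' : c = '=' := by
        have := pv_dropWhile_head_false hdwc
        simpa using this
      refine ⟨t, ?_⟩
      rw [← hsplit, htake, hdwc, hc']
      simp

lemma pv_splitEq_of_mem (l : String) (h : '=' ∈ l.toList) :
    pvSplitEq l = (String.ofList (l.toList.takeWhile (· != '=')),
                   String.ofList ((l.toList.dropWhile (· != '=')).tail)) := by
  unfold pvSplitEq
  rw [pv_splitMax_str, if_pos h]
  rfl

lemma pv_valA_eq (l : String) (h : '=' ∈ l.toList) :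
    pvValA l = PySem.Str.stripChars (PySem.Str.stripChars (PySem.Str.strip (pvSplitEq l).2) "'") "\"" := by
  unfold pvValA
  rw [pv_splitMax_str, if_pos h, pv_splitEq_of_mem l h]
  simp [PySem.List.pyGet?, PySem.List.pyIdx?]

-- the dict built by B's loop, looked up at an '='-free key, holds exactly A's first matching line's value
lemma pv_get_entries (ls : List String) : ∀ (d : PySem.Dict String String) (key : String),
    '=' ∉ key.toList →
    (ls.foldl pvStepB d).get? key =
      ((d.get? key).or ((ls.find? (fun l => PySem.Str.startswith l (key ++ "="))).map (fun l => (pvSplitEq l).2))) := by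
  induction ls with
  | nil => intro d key _; simp
  | cons l rest ih =>
    intro d key hk
    rw [List.foldl_cons]
    by_cases hs : PySem.Str.startswith l (key ++ "=") = true
    · obtain ⟨hmem, htake⟩ := (pv_startswith_iff l key hk).mp hs
      have hkeq : (pvSplitEq l).1 = key := by
        rw [pv_splitEq_of_mem l hmem]
        simp [htake]
      have hstep : pvStepB d l = d.setdefault key (pvSplitEq l).2 := by
        unfold pvStepB
        rw [if_pos ((pv_isIn_iff l).mpr hmem), ← hkeq]
      rw [List.find?_cons_of_pos (p := fun s => PySem.Str.startswith s (key ++ "=")) hs, hstep, ih _ key hk, PySem.Dict.get?_setdefault_self]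
      cases d.get? key <;> simp
    · rw [List.find?_cons_of_neg (p := fun s => PySem.Str.startswith s (key ++ "=")) (by simpa using hs)]
      by_cases hin : PySem.Str.isIn "=" l = true
      · have hmem := (pv_isIn_iff l).mp hin
        have hkne : key ≠ (pvSplitEq l).1 := by
          intro he
          apply hs
          rw [pv_startswith_iff l key hk]
          refine ⟨hmem, ?_⟩
          rw [pv_splitEq_of_mem l hmem] at he
          rw [he]
          simp
        have hstep : pvStepB d l = d.setdefault (pvSplitEq l).1 (pvSplitEq l).2 := by
          unfold pvStepB; rw [if_pos hin]
        rw [hstep, ih _ key hk, PySem.Dict.get?_setdefault_of_ne _ _ hkne]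
      · have hstep : pvStepB d l = d := by
          unfold pvStepB; rw [if_neg hin]
        rw [hstep, ih _ key hk]

-- A's outer scan over the priority keys equals B's lookup loop over the dict, post-processed
lemma pv_scan_eq_lookup (lines : List String) : ∀ (keys : List String),
    (∀ k ∈ keys, '=' ∉ k.toList) →
    pvScanA lines keys = pvLookupB (lines.foldl pvStepB PySem.Dict.empty) keys := by
  intro keys
  induction keys with
  | nil => intro _; rfl
  | cons key ks ih =>
    intro hk
    have hkey := hk key (List.mem_cons_self ..)
    have hget := pv_get_entries lines PySem.Dict.empty key hkey
    have hempty : (PySem.Dict.empty : PySem.Dict String String).get? key = none := rfl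
    rw [hempty, Option.none_or] at hget
    unfold pvScanA pvLookupB
    rw [hget]
    cases hfind : lines.find? (fun l => PySem.Str.startswith l (key ++ "=")) with
    | none =>
      exact ih (fun k hmem => hk k (List.mem_cons_of_mem _ hmem))
    | some l =>
      have hs : PySem.Str.startswith l (key ++ "=") = true :=
        List.find?_some (p := fun s => PySem.Str.startswith s (key ++ "=")) hfind
      have hmem := ((pv_startswith_iff l key hkey).mp hs).1
      simp only [Option.map_some]
      rw [pv_valA_eq l hmem]

lemma pv_keys_free (kind : String) :
    ∀ k ∈ (if kind = "telegram" then ["TELEGRAM_BOT_TOKEN", "BOT_TOKEN", "TOKEN"]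
           else if kind = "discord" then ["DISCORD_BOT_TOKEN", "BOT_TOKEN", "TOKEN"]
           else ["TOKEN"]), '=' ∉ k.toList := by
  by_cases h1 : kind = "telegram"
  · rw [if_pos h1]; decide
  · rw [if_neg h1]
    by_cases h2 : kind = "discord"
    · rw [if_pos h2]; decide
    · rw [if_neg h2]; decide

-- whole else-branch of A equals whole else-branch of B, for any cleaned line list and '='-free keys
lemma pv_main (lines keys keysB : List String) (hsel : keysB = keys) (hfree : ∀ k ∈ keys, '=' ∉ k.toList) :
    (match pvScanA lines keys with
     | some v => v
     | none =>
       match lines with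
       | [l] => if PySem.Str.isIn "=" l then "" else l
       | _ => "") =
    (pvLookupB (lines.foldl pvStepB PySem.Dict.empty) keysB).getD
      (if lines.length = 1 then
        (if PySem.Str.isIn "=" ((PySem.List.pyGet? lines 0).getD "") then ""
         else (PySem.List.pyGet? lines 0).getD "")
       else "") := by
  subst hsel
  rw [pv_scan_eq_lookup _ _ hfree]
  cases pvLookupB (lines.foldl pvStepB PySem.Dict.empty) keysB with
  | some v => rfl
  | none =>
    show _ = _
    match lines with
    | [] => rfl
    | [l] => rfl
    | l :: r :: t => rfl

-- B's dict-table key selection equals A's if/elif/else key selection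
lemma pv_keys_sel (kind : String) :
    ((PySem.Dict.empty.insert "telegram" ["TELEGRAM_BOT_TOKEN", "BOT_TOKEN", "TOKEN"]).insert "discord" ["DISCORD_BOT_TOKEN", "BOT_TOKEN", "TOKEN"]).getD kind ["TOKEN"] =
      (if kind = "telegram" then ["TELEGRAM_BOT_TOKEN", "BOT_TOKEN", "TOKEN"]
       else if kind = "discord" then ["DISCORD_BOT_TOKEN", "BOT_TOKEN", "TOKEN"]
       else ["TOKEN"]) := by
  rw [PySem.Dict.getD_insert, PySem.Dict.getD_insert]
  by_cases h1 : kind = "telegram"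
  · subst h1
    rw [if_neg (by decide), if_pos rfl, if_pos rfl]
  · by_cases h2 : kind = "discord"
    · subst h2
      rw [if_pos rfl, if_neg (by decide), if_pos rfl]
    · rw [if_neg h2, if_neg h1, if_neg h1, if_neg h2]
      rfl

-- ===== VERDICT (by name: the statement is the Claim_ definition above) =====
theorem extract_token_from_text_spec : Claim_equal_extract_token_from_text := by
  intro text kind _
  unfold Spec_extract_token_from_text extract_token_from_text extract_token_from_text_alt
  by_cases h0 : PySem.Str.strip text = ""
  · rw [if_pos h0, if_pos h0]
  · rw [if_neg h0, if_neg h0]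
    exact pv_main _ _ _ (pv_keys_sel kind) (pv_keys_free kind)
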